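-- pv_equiv track=rewrite | github.com/NoviScl/WubiBERT | utils.py | get_subchar_pos
-- ===== SOURCE A (Python) =====
-- def get_subchar_pos(tokens, subchars):
-- 	'''
-- 	Return starting index of each subchar in tokens.
-- 	NOTE: This assumes that the concatenation of tokens is equal to the
-- 	concatenation of subchars.
--
-- 	Example:
-- 	>>> Input:
-- 	>>> subchars  = ['jin+', 'ti', 'an+', 'ti', 'an+', 'qi+', 'hen+', 'hao+']
-- 	>>> tokens    = ['jin', '+', 'tian+', 'tian+qi', '+', 'hen+hao+']
-- 	>>> token_pos = [0, 2, 2, 3, 3, 3, 5, 5]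
-- 	'''
-- 	pos = [None] * len(subchars)
-- 	len_t = 0
-- 	len_s = 0
-- 	j = -1  # idx of last token that was added to len_t
-- 	for i, subchar in enumerate(subchars):
-- 		while len_t <= len_s:
-- 			j += 1
-- 			len_t += len(tokens[j])
-- 		pos[i] = j
-- 		len_s += len(subchar)
-- 	return pos
-- ===== SOURCE B (Python) =====
-- def get_subchar_pos(tokens, subchars):
--     # Build a flat char-offset -> token-index table once, then look up each
--     # subchar's running start offset in it.
--     char_to_token = []
--     for j, token in enumerate(tokens):
--         char_to_token.extend([j] * len(token))
--     pos = []
--     offset = 0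
--     for subchar in subchars:
--         pos.append(char_to_token[offset])
--         offset += len(subchar)
--     return pos
-- ===== Notes on version B (the rewrite author's own statement) =====
-- stated objective: alternative
-- what changed: B replaces A's interleaved two-pointer advance (inner while walking tokens while the outer loop walks subchars) with a build-index-then-lookup decomposition: first a flat char-offset-to-token-index table built once from tokens, then one direct table lookup per subchar at its running start offset.
import Mathlib
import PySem

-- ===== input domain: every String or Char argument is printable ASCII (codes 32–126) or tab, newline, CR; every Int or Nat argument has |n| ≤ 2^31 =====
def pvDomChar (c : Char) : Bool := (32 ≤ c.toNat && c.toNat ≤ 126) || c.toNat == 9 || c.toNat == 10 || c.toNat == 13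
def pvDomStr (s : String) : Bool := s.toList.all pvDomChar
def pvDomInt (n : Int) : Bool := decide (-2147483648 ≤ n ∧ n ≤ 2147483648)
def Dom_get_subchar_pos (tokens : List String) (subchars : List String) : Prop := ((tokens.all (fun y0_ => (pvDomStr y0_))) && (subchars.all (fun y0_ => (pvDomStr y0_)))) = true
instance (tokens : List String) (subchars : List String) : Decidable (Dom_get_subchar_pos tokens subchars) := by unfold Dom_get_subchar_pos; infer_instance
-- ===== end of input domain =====

-- B replaces A's interleaved two-pointer walk by a build-index-then-lookup
-- decomposition (flat char-offset→token-index table, then one lookup per subchar);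
-- objective: alternative (same cost, different structure).

-- ===== PORT A =====
-- the inner 'while len_t <= len_s' loop; rest = tokens[j+1:], none = IndexError on tokens[j]
def pvWhileA (j : Int) (rest : List String) (len_t len_s : Int) : Option (Int × List String × Int) :=
  if len_t ≤ len_s then
    match rest with
    | [] => none
    | t :: rs => pvWhileA (j + 1) rs (len_t + PySem.Str.len t) len_s
  else some (j, rest, len_t)

-- the outer 'for i, subchar in enumerate(subchars)' loop; acc holds pos reversed
def pvLoopA (subchars : List String) (j : Int) (rest : List String) (len_t len_s : Int) (acc : List Int) : Option (List Int) :=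
  match subchars with
  | [] => some acc.reverse
  | sc :: scs =>
    match pvWhileA j rest len_t len_s with
    | none => none
    | some (j', rest', len_t') => pvLoopA scs j' rest' len_t' (len_s + PySem.Str.len sc) (j' :: acc)

def get_subchar_pos (tokens : List String) (subchars : List String) : List Int :=
  (pvLoopA subchars (-1) tokens 0 0 []).getD []

-- ===== PORT B =====
-- 'for j, token in enumerate(tokens): char_to_token.extend([j]*len(token))'
def pvCtt (tokens : List String) : List Int :=
  (PySem.List.enumerate tokens 0).foldl
    (fun acc jt => acc ++ List.replicate (PySem.Str.len jt.2).toNat jt.1) []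

-- 'for subchar in subchars: pos.append(char_to_token[offset]); offset += len(subchar)'
def pvLoopB (ctt : List Int) (subchars : List String) (offset : Int) (acc : List Int) : Option (List Int) :=
  match subchars with
  | [] => some acc.reverse
  | sc :: scs =>
    match PySem.List.pyGet? ctt offset with
    | none => none
    | some v => pvLoopB ctt scs (offset + PySem.Str.len sc) (v :: acc)

def get_subchar_pos_alt (tokens : List String) (subchars : List String) : List Int :=
  (pvLoopB (pvCtt tokens) subchars 0 []).getD []

-- ===== PRECONDITION & SPEC =====
-- Pre_ excludes exactly the inputs where A raises IndexError (some subchar's start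
-- offset lies at or beyond the total token length); B raises IndexError there too.
def Pre_get_subchar_pos (tokens : List String) (subchars : List String) : Prop :=
  subchars = [] ∨ (subchars.dropLast.map String.length).sum < (tokens.map String.length).sum
instance (tokens : List String) (subchars : List String) : Decidable (Pre_get_subchar_pos tokens subchars) := by unfold Pre_get_subchar_pos; infer_instance
def pvWitness_get_subchar_pos : List String × List String := (["jin", "+", "tian+"], ["jin+", "ti", "an"])
def Spec_get_subchar_pos (tokens : List String) (subchars : List String) (out : List Int) : Prop := out = get_subchar_pos_alt tokens subchars
instance (tokens : List String) (subchars : List String) (out : List Int) : Decidable (Spec_get_subchar_pos tokens subchars out) := by unfold Spec_get_subchar_pos; infer_instance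

-- ===== CLAIM (what is proved, stated in full; the proofs are below) =====
def Claim_equal_get_subchar_pos : Prop := ∀ (tokens : List String) (subchars : List String), Dom_get_subchar_pos tokens subchars → Pre_get_subchar_pos tokens subchars → Spec_get_subchar_pos tokens subchars (get_subchar_pos tokens subchars)

-- ===== LEMMAS AND PROOFS =====

-- total length (in chars) of a list of strings
def pvLN (l : List String) : Nat := (l.map String.length).sum

theorem pvLN_nil : pvLN [] = 0 := rfl
theorem pvLN_cons (t : String) (ts : List String) : pvLN (t :: ts) = t.length + pvLN ts := by
  simp [pvLN]
theorem pvLN_append (xs ys : List String) : pvLN (xs ++ ys) = pvLN xs + pvLN ys := by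
  simp [pvLN]
-- recursive closed form of the char→token table, with starting index base
def pvCttF (base : Int) : List String → List Int
  | [] => []
  | t :: ts => List.replicate t.length base ++ pvCttF (base + 1) ts

theorem pvCtt_foldl (tokens : List String) : ∀ (base : Int) (acc : List Int),
    (PySem.List.enumerate tokens base).foldl
      (fun acc jt => acc ++ List.replicate (PySem.Str.len jt.2).toNat jt.1) acc
      = acc ++ pvCttF base tokens := by
  induction tokens with
  | nil => intro base acc; simp [PySem.List.enumerate, pvCttF]
  | cons t ts ih =>
      intro base acc
      have hcons : PySem.List.enumerate (t :: ts) base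
          = (base, t) :: PySem.List.enumerate ts (base + 1) := by
        simp [PySem.List.enumerate]
      rw [hcons, List.foldl_cons, ih]
      simp [pvCttF]

theorem pvCtt_eq (tokens : List String) : pvCtt tokens = pvCttF 0 tokens := by
  unfold pvCtt; rw [pvCtt_foldl]; rfl

theorem pvCttF_length (tokens : List String) : ∀ base : Int, (pvCttF base tokens).length = pvLN tokens := by
  induction tokens with
  | nil => intro base; rfl
  | cons t ts ih =>
      intro base
      simp [pvCttF, ih, pvLN_cons]

theorem pvCttF_append (xs ys : List String) : ∀ base : Int,
    pvCttF base (xs ++ ys) = pvCttF base xs ++ pvCttF (base + xs.length) ys := by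
  induction xs with
  | nil => intro base; simp [pvCttF]
  | cons t ts ih =>
      intro base
      simp only [List.cons_append, pvCttF, ih, List.append_assoc, List.length_cons]
      have : base + 1 + (ts.length : Int) = base + ((ts.length + 1 : Nat) : Int) := by
        push_cast; ring
      rw [← this]

theorem pvCttF_get (pre : List String) : ∀ (base : Int) (m : Nat),
    pvLN pre.dropLast ≤ m → m < pvLN pre →
    (pvCttF base pre)[m]? = some (base + pre.length - 1) := by
  induction pre with
  | nil => intro base m h1 h2; simp [pvLN_nil] at h2
  | cons t ts ih =>
      intro base m h1 h2
      rw [show pvCttF base (t :: ts) = List.replicate t.length base ++ pvCttF (base + 1) ts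
        from rfl]
      cases ts with
      | nil =>
          rw [pvLN_cons, pvLN_nil] at h2
          rw [List.getElem?_append_left (by simpa using (by omega : m < t.length))]
          simp [List.getElem?_replicate]
          omega
      | cons u us =>
          have hdl : (t :: u :: us).dropLast = t :: (u :: us).dropLast := rfl
          rw [hdl, pvLN_cons] at h1
          rw [pvLN_cons] at h2
          have htm : t.length ≤ m := by omega
          rw [List.getElem?_append_right (by simpa using htm)]
          simp only [List.length_replicate]
          rw [ih (base + 1) (m - t.length) (by omega) (by omega)]
          simp
          ring_nf

theorem pvWhileA_spec (rest : List String) : ∀ (pre : List String) (len_s : Int),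
    (pvLN pre.dropLast : Int) ≤ len_s →
    (if (pvLN (pre ++ rest) : Int) ≤ len_s then
        pvWhileA ((pre.length : Int) - 1) rest (pvLN pre) len_s = none
     else ∃ pre' rest', pre ++ rest = pre' ++ rest' ∧
        pvWhileA ((pre.length : Int) - 1) rest (pvLN pre) len_s
          = some ((pre'.length : Int) - 1, rest', (pvLN pre' : Int)) ∧
        (pvLN pre'.dropLast : Int) ≤ len_s ∧ len_s < (pvLN pre' : Int)) := by
  induction rest with
  | nil =>
      intro pre len_s h1
      simp only [List.append_nil]
      split_ifs with h
      · rw [pvWhileA.eq_def]; simp [h]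
      · refine ⟨pre, [], by simp, ?_, h1, by omega⟩
        rw [pvWhileA.eq_def]; simp [h]
  | cons t rs ih =>
      intro pre len_s h1
      by_cases hc : (pvLN pre : Int) ≤ len_s
      · have hstep : pvWhileA ((pre.length : Int) - 1) (t :: rs) (pvLN pre) len_s
            = pvWhileA (((pre ++ [t]).length : Int) - 1) rs (pvLN (pre ++ [t])) len_s := by
          rw [pvWhileA.eq_def]
          simp only [hc, if_pos]
          rw [pvLN_append, pvLN_cons, pvLN_nil]
          have hlen : PySem.Str.len t = (t.length : Int) := by simp
          simp only [hlen]
          have e1 : (pre.length : Int) - 1 + 1 = ((pre.length + 1 : Nat) : Int) - 1 := by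
            push_cast; ring
          have e2 : ((pvLN pre : Int)) + (t.length : Int)
              = ((pvLN pre + (t.length + 0) : Nat) : Int) := by push_cast; ring
          rw [e1, e2]
          simp
        have hdl : (pvLN (pre ++ [t]).dropLast : Int) ≤ len_s := by
          rw [List.dropLast_concat]
          exact hc
        have hih := ih (pre ++ [t]) len_s hdl
        rw [List.append_assoc] at hih
        simp only [List.singleton_append] at hih
        rw [hstep]
        exact hih
      · have hlt : ¬ ((pvLN (pre ++ t :: rs) : Int) ≤ len_s) := by
          rw [pvLN_append, pvLN_cons]
          push_cast
          omega
        rw [if_neg hlt]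
        refine ⟨pre, t :: rs, rfl, ?_, h1, by omega⟩
        rw [pvWhileA.eq_def]
        simp [hc]

theorem pvLoop_eq (subchars : List String) : ∀ (pre rest : List String) (len_s : Int) (acc : List Int),
    0 ≤ len_s → (pvLN pre.dropLast : Int) ≤ len_s →
    pvLoopA subchars ((pre.length : Int) - 1) rest (pvLN pre) len_s acc
      = pvLoopB (pvCttF 0 (pre ++ rest)) subchars len_s acc := by
  induction subchars with
  | nil => intro pre rest len_s acc h0 h1; rfl
  | cons sc scs ih =>
      intro pre rest len_s acc h0 h1
      have hw := pvWhileA_spec rest pre len_s h1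
      by_cases hc : (pvLN (pre ++ rest) : Int) ≤ len_s
      · rw [if_pos hc] at hw
        have hget : PySem.List.pyGet? (pvCttF 0 (pre ++ rest)) len_s = none := by
          rw [PySem.List.pyGet?_of_nonneg _ h0]
          apply List.getElem?_eq_none
          rw [pvCttF_length]
          omega
        simp only [pvLoopA, pvLoopB, hw, hget]
      · rw [if_neg hc] at hw
        obtain ⟨pre', rest', heq, hrun, hdl', hlt⟩ := hw
        have hge0 : pvLN pre'.dropLast ≤ len_s.toNat ∧ len_s.toNat < pvLN pre' := by
          constructor <;> omega
        have hget : PySem.List.pyGet? (pvCttF 0 (pre ++ rest)) len_s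
            = some ((pre'.length : Int) - 1) := by
          rw [PySem.List.pyGet?_of_nonneg _ h0, heq, pvCttF_append]
          rw [List.getElem?_append_left (by rw [pvCttF_length]; omega)]
          rw [pvCttF_get pre' 0 len_s.toNat hge0.1 hge0.2]
          norm_num
        simp only [pvLoopA, pvLoopB, hrun, hget]
        have hsc : (0 : Int) ≤ PySem.Str.len sc := by simp
        have hrec := ih pre' rest' (len_s + PySem.Str.len sc) (((pre'.length : Int) - 1) :: acc)
          (by omega) (by omega)
        rw [hrec, heq]

-- ===== VERDICT (by name: the statement is the Claim_ definition above) =====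
theorem get_subchar_pos_spec : Claim_equal_get_subchar_pos := by
  intro tokens subchars _ _
  unfold Spec_get_subchar_pos get_subchar_pos get_subchar_pos_alt
  rw [pvCtt_eq]
  have h := pvLoop_eq subchars [] tokens 0 [] (by omega) (by simp [pvLN_nil])
  simp only [List.length_nil, List.nil_append, Nat.cast_zero, pvLN_nil] at h
  norm_num at h
  rw [h]
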